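-- pv_equiv track=rewrite | github.com/vkriznar/pronalUI | src/other_files/main_z_razredi.py | zamenjaj
-- ===== SOURCE A (Python) =====
-- def zamenjaj(string):
--     chars = list(string)
--     for i in range(0, len(chars)):
--         if chars[i] == "\n":
--             chars[i] = "<br>"
--         if chars[i] == " ":
--             chars[i] = "&nbsp"
--         if chars[i] == "\r":
--             chars[i] = ""
--     return "".join(chars)
-- ===== SOURCE B (Python) =====
-- def zamenjaj(string):
--     return string.replace("\n", "<br>").replace(" ", "&nbsp").replace("\r", "")
-- ===== Notes on version B (the rewrite author's own statement) =====
-- stated objective: idiomatic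
-- what changed: Replaces the index loop that mutates a list of characters in place with three sequential str.replace passes (safe because no replacement string contains any searched character); the C-level scans avoid the per-character Python-level loop.
import Mathlib
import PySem

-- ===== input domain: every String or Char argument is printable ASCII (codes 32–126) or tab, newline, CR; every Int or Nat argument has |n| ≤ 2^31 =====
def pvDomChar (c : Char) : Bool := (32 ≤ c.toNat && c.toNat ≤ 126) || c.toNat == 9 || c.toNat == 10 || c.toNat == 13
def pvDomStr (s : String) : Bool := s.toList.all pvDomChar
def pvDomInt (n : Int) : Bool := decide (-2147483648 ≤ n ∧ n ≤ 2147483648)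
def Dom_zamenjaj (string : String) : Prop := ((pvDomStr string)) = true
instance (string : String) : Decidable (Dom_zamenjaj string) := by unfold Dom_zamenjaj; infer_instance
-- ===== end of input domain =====

-- B replaces A's index loop over a mutated list of characters with three sequential str.replace passes; same return value (idiomatic rewrite, no speed claim).

-- ===== PORT A =====
-- the body of A's for-loop: three ifs mutating chars[i] in place
def pvStepA (cs : List String) (i : Int) : List String :=
  let cs := if PySem.List.pyGetD cs i "" = "\n" then PySem.List.pySetD cs i "<br>" else cs
  let cs := if PySem.List.pyGetD cs i "" = " " then PySem.List.pySetD cs i "&nbsp" else cs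
  let cs := if PySem.List.pyGetD cs i "" = "\r" then PySem.List.pySetD cs i "" else cs
  cs

-- chars = list(string); for i in range(0, len(chars)): …; return "".join(chars)
def zamenjaj (string : String) : String :=
  let chars : List String := string.toList.map (fun c => String.ofList [c])
  let chars := (PySem.List.pyRange 0 (chars.length : Int) 1).foldl pvStepA chars
  PySem.Str.join "" chars

-- ===== PORT B =====
def zamenjaj_alt (string : String) : String :=
  PySem.Str.replace (PySem.Str.replace (PySem.Str.replace string "\n" "<br>") " " "&nbsp") "\r" ""

-- ===== PRECONDITION & SPEC =====
def Spec_zamenjaj (string : String) (out : String) : Prop := out = zamenjaj_alt string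
instance (string : String) (out : String) : Decidable (Spec_zamenjaj string out) := by unfold Spec_zamenjaj; infer_instance

-- ===== CLAIM (what is proved, stated in full; the proofs are below) =====
def Claim_equal_zamenjaj : Prop := ∀ (string : String), Dom_zamenjaj string → Spec_zamenjaj string (zamenjaj string)

-- ===== LEMMAS AND PROOFS =====

def pvSubStr (c : Char) : String :=
  if c = '\n' then "<br>"
  else if c = ' ' then "&nbsp"
  else if c = '\r' then ""
  else String.ofList [c]

lemma single_eq_lit (x c : Char) : (String.ofList [x] = String.ofList [c]) ↔ x = c := by
  constructor
  · intro h
    have := congrArg String.toList h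
    simpa using this
  · intro h; rw [h]

lemma step_at (A B' : List String) (x : Char) :
    pvStepA (A ++ String.ofList [x] :: B') (A.length : Int) = A ++ pvSubStr x :: B' := by
  unfold pvStepA
  simp only [PySem.List.pyGetD_natCast, PySem.List.pySetD_natCast]
  by_cases h1 : x = '\n'
  · subst h1
    simp [List.getD, show (String.ofList ['\n']) = "\n" from rfl, pvSubStr,
      show ¬("<br>":String) = " " by decide, show ¬("<br>":String) = "\r" by decide]
  · by_cases h2 : x = ' '
    · subst h2
      simp [List.getD, show (String.ofList [' ']) = " " from rfl, pvSubStr,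
        show ¬(" ":String) = "\n" by decide, show ¬("&nbsp":String) = "\r" by decide,
        show ¬(' ':Char) = '\n' by decide]
    · by_cases h3 : x = '\r'
      · subst h3
        simp [List.getD, show (String.ofList ['\r']) = "\r" from rfl, pvSubStr,
          show ¬("\r":String) = "\n" by decide, show ¬("\r":String) = " " by decide,
          show ¬('\r':Char) = '\n' by decide, show ¬('\r':Char) = ' ' by decide]
      · have e1 : ¬ String.ofList [x] = "\n" := by
          rw [show ("\n":String) = String.ofList ['\n'] from rfl, single_eq_lit]; exact h1
        have e2 : ¬ String.ofList [x] = " " := by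
          rw [show (" ":String) = String.ofList [' '] from rfl, single_eq_lit]; exact h2
        have e3 : ¬ String.ofList [x] = "\r" := by
          rw [show ("\r":String) = String.ofList ['\r'] from rfl, single_eq_lit]; exact h3
        simp [List.getD, e1, e2, e3, pvSubStr, h1, h2, h3]

lemma loopA (l : List Char) (k : Nat) (hk : k ≤ l.length) :
    (PySem.List.pyRange 0 (k : Int) 1).foldl pvStepA (l.map (fun c => String.ofList [c])) =
      (l.take k).map pvSubStr ++ (l.drop k).map (fun c => String.ofList [c]) := by
  induction k with
  | zero => simp [PySem.List.pyRange]
  | succ k ih =>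
      have hk' : k < l.length := hk
      rw [Nat.cast_add, Nat.cast_one, PySem.List.pyRange_one_succ_right (by positivity)]
      rw [List.foldl_append, ih (le_of_lt hk')]
      simp only [List.foldl_cons, List.foldl_nil]
      rw [List.drop_eq_getElem_cons hk', List.map_cons]
      have hlen : ((l.take k).map pvSubStr).length = k := by
        simp [List.length_take, Nat.min_eq_left (le_of_lt hk')]
      rw [show (k : Int) = (((l.take k).map pvSubStr).length : Int) by rw [hlen]]
      rw [step_at]
      simp only [List.map_take, List.map_drop]
      rw [List.take_succ_eq_append_getElem (show k < (List.map pvSubStr l).length by simpa using hk')]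
      simp

lemma intercalate_nil_flatten (xs : List (List Char)) : List.intercalate [] xs = xs.flatten := by
  induction xs with
  | nil => simp [List.intercalate]
  | cons x t ih => cases t <;> simp_all [List.intercalate, List.intersperse]

lemma replace_go_single (c : Char) (new : List Char) :
    ∀ (l acc : List Char) (fuel : Nat), l.length ≤ fuel →
      PySem.Chars.replace.go [c] new fuel l acc =
        acc.reverse ++ l.flatMap (fun x => if x = c then new else [x]) := by
  intro l
  induction l with
  | nil =>
      intro acc fuel _
      cases fuel <;> simp [PySem.Chars.replace.go]
  | cons x t ih =>
      intro acc fuel hf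
      cases fuel with
      | zero => simp at hf
      | succ fuel =>
        rw [PySem.Chars.replace.go]
        by_cases hx : x = c
        · subst hx
          simp only [List.isPrefixOf, BEq.rfl, Bool.and_true, if_pos,
            List.length_cons, List.drop_succ_cons, List.length_nil, List.drop_zero]
          rw [ih _ fuel (by simpa using hf)]
          simp
        · have hb : ([c].isPrefixOf (x :: t)) = false := by
            simp only [List.isPrefixOf, Bool.and_true, beq_eq_false_iff_ne, ne_eq]
            exact fun h => hx h.symm
          simp only [hb, Bool.false_eq_true, if_false]
          rw [ih _ fuel (by simpa using hf)]
          simp [hx]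

lemma replace_single (s : List Char) (c : Char) (new : List Char) :
    PySem.Chars.replace s [c] new = s.flatMap (fun x => if x = c then new else [x]) := by
  rw [PySem.Chars.replace]
  simp [replace_go_single c new s [] s.length (le_refl _)]

lemma compose_char (c : Char) :
    (if c = '\n' then "<br>".toList else [c]).flatMap
        (fun x => (if x = ' ' then "&nbsp".toList else [x]).flatMap
          (fun y => if y = '\r' then ([] : List Char) else [y])) = (pvSubStr c).toList := by
  by_cases h1 : c = '\n'
  · subst h1; decide
  · by_cases h2 : c = ' '
    · subst h2; decide
    · by_cases h3 : c = '\r'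
      · subst h3; decide
      · simp [h1, h2, h3, pvSubStr]

-- ===== VERDICT (by name: the statement is the Claim_ definition above) =====
theorem zamenjaj_spec : Claim_equal_zamenjaj := by
  intro s _
  unfold Spec_zamenjaj zamenjaj zamenjaj_alt
  apply String.toList_inj.mp
  show (PySem.Str.join "" _).toList = (PySem.Str.replace (PySem.Str.replace (PySem.Str.replace s "\n" "<br>") " " "&nbsp") "\r" "").toList
  rw [PySem.Str.toList_join]
  have hlen : (s.toList.map (fun c => String.ofList [c])).length = s.toList.length := by simp
  rw [hlen, loopA s.toList s.toList.length (le_refl _)]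
  rw [PySem.Str.toList_replace, PySem.Str.toList_replace, PySem.Str.toList_replace]
  rw [show ("\n":String).toList = ['\n'] from rfl, show (" ":String).toList = [' '] from rfl,
      show ("\r":String).toList = ['\r'] from rfl, show ("":String).toList = [] from rfl]
  rw [replace_single, replace_single, replace_single]
  rw [List.flatMap_assoc, List.flatMap_assoc]
  rw [show (fun x => (if x = '\n' then "<br>".toList else [x]).flatMap
        (fun x => (if x = ' ' then "&nbsp".toList else [x]).flatMap
          (fun y => if y = '\r' then ([] : List Char) else [y]))) = (fun c => (pvSubStr c).toList)
      from funext compose_char]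
  rw [List.take_of_length_le (le_refl _), List.drop_of_length_le (le_refl _)]
  simp [PySem.Chars.join, intercalate_nil_flatten, List.flatMap_def, Function.comp_def]
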